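-- pv_equiv track=rewrite | github.com/sergiogaiotto/agente-inteligencia | app/core/database.py | _qmark_to_dollar
-- ===== SOURCE A (Python) =====
-- from typing import Any, Optional
--
-- def _qmark_to_dollar(sql: str) -> str:
--     """Converte placeholders '?' (SQLite-style) para '$1, $2, ...' (Postgres)."""
--     out: list[str] = []
--     n = 0
--     in_str = False
--     sc: Optional[str] = None
--     i = 0
--     while i < len(sql):
--         c = sql[i]
--         if in_str:
--             out.append(c)
--             if c == sc:
--                 if i + 1 < len(sql) and sql[i + 1] == sc:
--                     out.append(sc)
--                     i += 2
--                     continue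
--                 in_str = False
--                 sc = None
--             i += 1
--             continue
--         if c in ("'", '"'):
--             in_str = True
--             sc = c
--             out.append(c)
--             i += 1
--             continue
--         if c == "?":
--             n += 1
--             out.append(f"${n}")
--             i += 1
--             continue
--         out.append(c)
--         i += 1
--     return "".join(out)
-- ===== SOURCE B (Python) =====
-- def _qmark_to_dollar(sql: str) -> str:
--     """Converte placeholders '?' (SQLite-style) para '$1, $2, ...' (Postgres)."""
--     parts = []
--     n = 0
--     i = 0
--     L = len(sql)
--     while i < L:
--         c = sql[i]
--         if c == "'" or c == '"':
--             j = _literal_end(sql, i + 1, c)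
--             parts.append(sql[i:j])
--             i = j
--         elif c == "?":
--             n += 1
--             parts.append(f"${n}")
--             i += 1
--         else:
--             parts.append(c)
--             i += 1
--     return "".join(parts)
--
--
-- def _literal_end(sql: str, i: int, q: str) -> int:
--     """Index just past the closing quote of the literal whose body starts at i,
--     jumping from quote to quote with str.find (a doubled quote is an escape)."""
--     L = len(sql)
--     while True:
--         k = sql.find(q, i)
--         if k == -1:
--             return L
--         if k + 1 < L and sql[k + 1] == q:
--             i = k + 2
--         else:
--             return k + 1
-- ===== Notes on version B (the rewrite author's own statement) =====
-- stated objective: alternative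
-- what changed: Replaces A's single per-character state machine (in_str/sc flags threaded through one loop) by an index-based tokenizer whose helper consumes a whole string literal at a time, jumping from quote to quote with str.find and emitting the literal as one slice, so no quoting state is carried through the main loop.
import Mathlib
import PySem

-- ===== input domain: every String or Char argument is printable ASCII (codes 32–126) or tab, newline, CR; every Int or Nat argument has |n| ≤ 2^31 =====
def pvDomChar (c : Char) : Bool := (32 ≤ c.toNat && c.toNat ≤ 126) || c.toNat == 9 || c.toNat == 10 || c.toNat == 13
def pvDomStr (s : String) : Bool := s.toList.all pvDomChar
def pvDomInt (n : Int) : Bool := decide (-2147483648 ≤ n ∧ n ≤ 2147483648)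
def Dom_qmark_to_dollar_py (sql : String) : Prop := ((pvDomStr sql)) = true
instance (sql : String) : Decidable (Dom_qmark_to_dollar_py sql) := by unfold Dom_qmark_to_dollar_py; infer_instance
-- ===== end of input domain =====

-- B replaces A's per-character in_str/sc state machine by an index-based tokenizer whose
-- helper consumes a whole string literal at a time (find-jumps from quote to quote,
-- emitting the literal as one slice); objective: alternative, same asymptotic cost.

-- ===== PORT A =====
-- A's while loop over index i with state (n, in_str, sc); out.append(x) becomes
-- consing x onto the output of the rest of the loop.
def pvALoop (cs : List Char) (n : Int) (inStr : Bool) (sc : Option Char) : List Char :=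
  match cs with
  | [] => []
  | c :: rest =>
    if inStr then
      -- out.append(c); if c == sc: look at sql[i+1]
      if sc = some c then
        match rest with
        | c2 :: rest2 =>
          if c2 = c then c :: c :: pvALoop rest2 n inStr sc   -- doubled quote: append sc, i += 2
          else c :: pvALoop (c2 :: rest2) n false none
        | [] => c :: pvALoop [] n false none
      else c :: pvALoop rest n inStr sc
    else if c = '\'' ∨ c = '"' then c :: pvALoop rest n true (some c)
    else if c = '?' then '$' :: (PySem.Int.toStr (n + 1)).toList ++ pvALoop rest (n + 1) inStr sc
    else c :: pvALoop rest n inStr sc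
termination_by cs.length
decreasing_by all_goals (simp; try omega)

def qmark_to_dollar_py (sql : String) : String :=
  String.ofList (pvALoop sql.toList 0 false none)

-- ===== PORT B =====
-- B's _literal_end: sql.find(q, i) is ported as findIdx? on s.drop i (exact for i ≤ len).
def pvLitEnd (s : List Char) (q : Char) (i : Nat) : Nat :=
  match (s.drop i).findIdx? (fun x => x = q) with
  | none => s.length                                         -- k == -1: return L
  | some d =>
    if hk : i + d + 1 < s.length ∧ s[i + d + 1]? = some q
    then pvLitEnd s q (i + d + 2)                            -- doubled quote: i = k + 2
    else i + d + 1                                           -- return k + 1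
termination_by s.length - i
decreasing_by obtain ⟨h1, _⟩ := hk; omega

-- needed by pvBMain's termination: _literal_end never moves backwards
theorem pvLitEnd_ge_aux (s : List Char) (q : Char) : ∀ (m i : Nat),
    s.length - i ≤ m → i ≤ s.length → i ≤ pvLitEnd s q i := by
  intro m
  induction m with
  | zero =>
    intro i hm hi
    have hd : s.drop i = [] := by
      have : s.length ≤ i := by omega
      simp [List.drop_eq_nil_iff, this]
    rw [pvLitEnd.eq_def, hd]
    simpa using hi
  | succ m ih =>
    intro i hm hi
    rw [pvLitEnd.eq_def]
    cases hf : (s.drop i).findIdx? (fun x => x = q) with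
    | none => simpa using hi
    | some d =>
      simp only []
      by_cases hk : i + d + 1 < s.length ∧ s[i + d + 1]? = some q
      · rw [dif_pos hk]
        have := ih (i + d + 2) (by omega) (by omega)
        omega
      · rw [dif_neg hk]
        omega

theorem pvLitEnd_ge (s : List Char) (q : Char) (i : Nat) (hi : i ≤ s.length) :
    i ≤ pvLitEnd s q i :=
  pvLitEnd_ge_aux s q (s.length - i) i le_rfl hi

-- B's main while loop over the index i, threading the placeholder counter n;
-- the slice sql[i:j] is ported as (s.drop i).take (j - i) (exact: i ≤ j ≤ len here).
def pvBMain (s : List Char) (i : Nat) (n : Int) : List Char :=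
  if h : i < s.length then
    let c := s[i]
    if c = '\'' ∨ c = '"' then
      (s.drop i).take (pvLitEnd s c (i + 1) - i) ++ pvBMain s (pvLitEnd s c (i + 1)) n
    else if c = '?' then
      '$' :: (PySem.Int.toStr (n + 1)).toList ++ pvBMain s (i + 1) (n + 1)
    else c :: pvBMain s (i + 1) n
  else []
termination_by s.length - i
decreasing_by
  · have := pvLitEnd_ge s s[i] (i + 1) (by omega)
    omega
  · omega
  · omega

def qmark_to_dollar_py_alt (sql : String) : String :=
  String.ofList (pvBMain sql.toList 0 0)

-- ===== PRECONDITION & SPEC =====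
def Spec_qmark_to_dollar_py (sql : String) (out : String) : Prop := out = qmark_to_dollar_py_alt sql
instance (sql : String) (out : String) : Decidable (Spec_qmark_to_dollar_py sql out) := by unfold Spec_qmark_to_dollar_py; infer_instance

-- ===== CLAIM (what is proved, stated in full; the proofs are below) =====
def Claim_equal_qmark_to_dollar_py : Prop := ∀ (sql : String), Dom_qmark_to_dollar_py sql → Spec_qmark_to_dollar_py sql (qmark_to_dollar_py sql)

-- ===== LEMMAS AND PROOFS =====

theorem pvALoop_nil (n : Int) (b : Bool) (sc : Option Char) : pvALoop [] n b sc = [] := by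
  rw [pvALoop.eq_def]

-- inside a literal, A copies chars that are not the closing quote verbatim
theorem pvALoop_copy (q : Char) (pre : List Char) (hpre : ∀ x ∈ pre, x ≠ q)
    (rest : List Char) (n : Int) :
    pvALoop (pre ++ rest) n true (some q) = pre ++ pvALoop rest n true (some q) := by
  induction pre with
  | nil => simp
  | cons c cs ih =>
    have hc : c ≠ q := hpre c (by simp)
    rw [List.cons_append, pvALoop.eq_def]
    have hcc : ¬ ((some q : Option Char) = some c) := by
      simpa using fun e => hc e.symm
    simp [hcc, ih (fun x hx => hpre x (by simp [hx]))]

theorem pvMemTake (l : List Char) (d : Nat) (q : Char)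
    (hall : ∀ (j : Nat) (hj : j < l.length), j < d → ¬ l[j] = q) :
    ∀ x ∈ l.take d, x ≠ q := by
  intro x hx
  obtain ⟨j, hj, he⟩ := List.mem_iff_getElem.mp hx
  have hj' : j < l.length := lt_of_lt_of_le hj (by simp)
  have hjd : j < d := by simp at hj; omega
  rw [List.getElem_take] at he
  exact fun hq => hall j hj' hjd (he ▸ hq)

-- A's in-literal scanning from position i produces exactly the slice sql[i:_literal_end(...)]
theorem pvLit_aux (s : List Char) (q : Char) : ∀ (m i : Nat),
    s.length - i ≤ m → i ≤ s.length → ∀ (n : Int),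
    pvALoop (s.drop i) n true (some q)
      = (s.drop i).take (pvLitEnd s q i - i)
          ++ pvALoop (s.drop (pvLitEnd s q i)) n false none := by
  intro m
  induction m with
  | zero =>
    intro i hm hi n
    have hd : s.drop i = [] := by
      have : s.length ≤ i := by omega
      simp [List.drop_eq_nil_iff, this]
    have hE : pvLitEnd s q i = s.length := by
      rw [pvLitEnd.eq_def, hd, List.findIdx?_nil]
    rw [hE, hd, List.drop_length]
    simp [pvALoop_nil]
  | succ m ih =>
    intro i hm hi n
    cases hf : (s.drop i).findIdx? (fun x => x = q) with
    | none =>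
      have hE : pvLitEnd s q i = s.length := by
        rw [pvLitEnd.eq_def, hf]
      have hall : ∀ x ∈ s.drop i, x ≠ q := fun x hx => by
        have := List.findIdx?_eq_none_iff.mp hf x hx
        simpa using this
      have hcopy := pvALoop_copy q (s.drop i) hall [] n
      rw [List.append_nil] at hcopy
      rw [hcopy, pvALoop_nil, hE]
      have h1 : (s.drop i).take (s.length - i) = s.drop i := by
        apply List.take_of_length_le
        simp
      rw [h1, List.drop_length, pvALoop_nil, List.append_nil]
    | some d =>
      obtain ⟨hd, hpd, hprev⟩ := List.findIdx?_eq_some_iff_getElem.mp hf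
      have hdq : (s.drop i)[d] = q := by simpa using hpd
      have hdL : i + d < s.length := by simp at hd; omega
      have hsplit : s.drop i = (s.drop i).take d ++ q :: s.drop (i + d + 1) := by
        conv_lhs => rw [← List.take_append_drop d (s.drop i)]
        congr 1
        rw [List.drop_eq_getElem_cons hd, hdq, List.drop_drop]
        simp [Nat.add_assoc]
      have hpre : ∀ x ∈ (s.drop i).take d, x ≠ q :=
        pvMemTake _ d q (fun j hj hjd hq => hprev j hjd (by simpa using hq))
      have hlenpre : ((s.drop i).take d).length = d := by
        simp at hd ⊢
        omega
      conv_lhs => rw [hsplit]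
      rw [pvALoop_copy q _ hpre _ n]
      by_cases hk : i + d + 1 < s.length ∧ s[i + d + 1]? = some q
      · have hE : pvLitEnd s q i = pvLitEnd s q (i + d + 2) := by
          rw [pvLitEnd.eq_def, hf]
          simp only []
          rw [dif_pos hk]
        have hcons : s.drop (i + d + 1) = q :: s.drop (i + d + 2) := by
          rw [List.drop_eq_getElem_cons hk.1]
          obtain ⟨_, he⟩ := List.getElem?_eq_some_iff.mp hk.2
          rw [he]
        have hstep : pvALoop (q :: q :: s.drop (i + d + 2)) n true (some q)
            = q :: q :: pvALoop (s.drop (i + d + 2)) n true (some q) := by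
          rw [pvALoop.eq_def]; simp
        have hge : i + d + 2 ≤ pvLitEnd s q (i + d + 2) :=
          pvLitEnd_ge s q (i + d + 2) (by omega)
        rw [hcons, hstep, ih (i + d + 2) (by omega) (by omega) n, hE]
        have htake : (s.drop i).take (pvLitEnd s q (i + d + 2) - i)
            = (s.drop i).take d ++ q :: q ::
                (s.drop (i + d + 2)).take (pvLitEnd s q (i + d + 2) - (i + d + 2)) := by
          conv_lhs => rw [hsplit, hcons]
          rw [show pvLitEnd s q (i + d + 2) - i
              = d + ((pvLitEnd s q (i + d + 2) - (i + d + 2)) + 1 + 1) by omega]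
          rw [List.take_append, hlenpre]
          simp only [Nat.add_sub_cancel_left, List.take_succ_cons]
          rw [List.take_of_length_le (by omega)]
        rw [htake]
        simp
      · have hE : pvLitEnd s q i = i + d + 1 := by
          rw [pvLitEnd.eq_def, hf]
          simp only []
          rw [dif_neg hk]
        rw [hE]
        have htake : (s.drop i).take (i + d + 1 - i) = (s.drop i).take d ++ [q] := by
          conv_lhs => rw [hsplit]
          rw [show i + d + 1 - i = d + 1 by omega]
          rw [List.take_append, hlenpre]
          simp
        rw [htake]
        cases hrest : s.drop (i + d + 1) with
        | nil =>
          have hstep : pvALoop [q] n true (some q) = [q] := by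
            rw [pvALoop.eq_def]; simp [pvALoop_nil]
          rw [hstep, pvALoop_nil]
          simp
        | cons c2 t2 =>
          have hlt : i + d + 1 < s.length := by
            by_contra hle
            rw [List.drop_eq_nil_iff.mpr (by omega)] at hrest
            simp at hrest
          have hc2 : s[i + d + 1]? = some c2 := by
            rw [List.getElem?_eq_getElem hlt]
            rw [List.drop_eq_getElem_cons hlt] at hrest
            exact congrArg some (List.cons.injEq .. ▸ hrest).1 ▸ rfl
          have hc2q : c2 ≠ q := by
            intro he
            exact hk ⟨hlt, he ▸ hc2⟩
          have hstep : pvALoop (q :: c2 :: t2) n true (some q)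
              = q :: pvALoop (c2 :: t2) n false none := by
            rw [pvALoop.eq_def]; simp [hc2q]
          rw [hstep]
          simp

-- A's outer loop equals B's index loop
theorem pvMain (s : List Char) : ∀ (m i : Nat), s.length - i ≤ m → ∀ (n : Int),
    pvALoop (s.drop i) n false none = pvBMain s i n := by
  intro m
  induction m with
  | zero =>
    intro i hm n
    have hd : s.drop i = [] := by
      have : s.length ≤ i := by omega
      simp [List.drop_eq_nil_iff, this]
    rw [pvBMain.eq_def, dif_neg (by omega), hd, pvALoop_nil]
  | succ m ih =>
    intro i hm n
    by_cases hlt : i < s.length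
    · have hcons : s.drop i = s[i] :: s.drop (i + 1) := List.drop_eq_getElem_cons hlt
      rw [pvBMain.eq_def, dif_pos hlt]
      simp only []
      by_cases hq : s[i] = '\'' ∨ s[i] = '"'
      · have hA : pvALoop (s[i] :: s.drop (i + 1)) n false none
            = s[i] :: pvALoop (s.drop (i + 1)) n true (some s[i]) := by
          rw [pvALoop.eq_def]; simp [hq]
        have hge : i + 1 ≤ pvLitEnd s s[i] (i + 1) := pvLitEnd_ge s s[i] (i + 1) (by omega)
        rw [hcons, hA, pvLit_aux s s[i] (s.length - (i + 1)) (i + 1) le_rfl (by omega) n]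
        rw [ih (pvLitEnd s s[i] (i + 1)) (by omega) n]
        rw [if_pos hq]
        have htake : (s[i] :: s.drop (i + 1)).take (pvLitEnd s s[i] (i + 1) - i)
            = s[i] :: (s.drop (i + 1)).take (pvLitEnd s s[i] (i + 1) - (i + 1)) := by
          rw [show pvLitEnd s s[i] (i + 1) - i
              = (pvLitEnd s s[i] (i + 1) - (i + 1)) + 1 by omega]
          rw [List.take_succ_cons]
        rw [htake]
        simp
      · by_cases hqm : s[i] = '?'
        · have hA : pvALoop (s[i] :: s.drop (i + 1)) n false none
              = '$' :: (PySem.Int.toStr (n + 1)).toList ++ pvALoop (s.drop (i + 1)) (n + 1) false none := by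
            rw [pvALoop.eq_def]; simp [hqm]
          rw [hcons, hA, ih (i + 1) (by omega) (n + 1), if_neg hq, if_pos hqm]
        · have hA : pvALoop (s[i] :: s.drop (i + 1)) n false none
              = s[i] :: pvALoop (s.drop (i + 1)) n false none := by
            rw [pvALoop.eq_def]; simp [hq, hqm]
          rw [hcons, hA, ih (i + 1) (by omega) n, if_neg hq, if_neg hqm]
    · have hd : s.drop i = [] := by simp [List.drop_eq_nil_iff]; omega
      rw [pvBMain.eq_def, dif_neg hlt, hd, pvALoop_nil]

-- ===== VERDICT (by name: the statement is the Claim_ definition above) =====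
theorem qmark_to_dollar_py_spec : Claim_equal_qmark_to_dollar_py := by
  intro sql _
  unfold Spec_qmark_to_dollar_py qmark_to_dollar_py qmark_to_dollar_py_alt
  have := pvMain sql.toList sql.toList.length 0 (by omega) 0
  rw [List.drop_zero] at this
  rw [this]
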